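-- pv_equiv track=rewrite | github.com/akumarn74/synapseGuard | agents/crisis_prevention.py | _parse_strategies_from_text
-- ===== SOURCE A (Python) =====
-- from typing import Dict, Any, List
--
-- def _parse_strategies_from_text(text: str) -> List[Dict]:
--     """Parse strategies from AI text response"""
--     strategies = []
--     lines = text.split('\n')
--     current_strategy = {}
--
--     for line in lines:
--         line = line.strip()
--         if 'type:' in line.lower() or 'strategy:' in line.lower():
--             if current_strategy:
--                 strategies.append(current_strategy)
--             current_strategy = {'type': line.split(':')[1].strip()}
--         elif 'description:' in line.lower():
--             current_strategy['description'] = line.split(':', 1)[1].strip()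
--         elif 'priority:' in line.lower():
--             current_strategy['priority'] = line.split(':')[1].strip().lower()
--         elif 'timeline:' in line.lower():
--             current_strategy['timeline'] = line.split(':', 1)[1].strip()
--
--     if current_strategy:
--         strategies.append(current_strategy)
--
--     return strategies[:6]
-- ===== SOURCE B (Python) =====
-- from typing import Dict, Any, List
--
-- def _parse_strategies_from_text(text: str) -> List[Dict]:
--     def classify(line):
--         low = line.lower()
--         if 'type:' in low or 'strategy:' in low:
--             return ('type', line.split(':')[1].strip())
--         if 'description:' in low:
--             return ('description', line.split(':', 1)[1].strip())
--         if 'priority:' in low: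
--             return ('priority', line.split(':')[1].strip().lower())
--         if 'timeline:' in low:
--             return ('timeline', line.split(':', 1)[1].strip())
--         return None
--
--     fields = [kv for kv in (classify(l.strip()) for l in text.split('\n')) if kv]
--     blocks = [[]]
--     for kv in fields:
--         if kv[0] == 'type':
--             blocks.append([kv])
--         else:
--             blocks[-1].append(kv)
--     return [dict(b) for b in blocks if b][:6]
-- ===== Notes on version B (the rewrite author's own statement) =====
-- stated objective: simpler
-- what changed: A's single loop that mutates a current dict is re-decomposed into three passes: classify each stripped line into an optional (key, value) field, segment the field list into blocks at every header field, then build one dict per non-empty block and truncate to 6.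
import Mathlib
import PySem

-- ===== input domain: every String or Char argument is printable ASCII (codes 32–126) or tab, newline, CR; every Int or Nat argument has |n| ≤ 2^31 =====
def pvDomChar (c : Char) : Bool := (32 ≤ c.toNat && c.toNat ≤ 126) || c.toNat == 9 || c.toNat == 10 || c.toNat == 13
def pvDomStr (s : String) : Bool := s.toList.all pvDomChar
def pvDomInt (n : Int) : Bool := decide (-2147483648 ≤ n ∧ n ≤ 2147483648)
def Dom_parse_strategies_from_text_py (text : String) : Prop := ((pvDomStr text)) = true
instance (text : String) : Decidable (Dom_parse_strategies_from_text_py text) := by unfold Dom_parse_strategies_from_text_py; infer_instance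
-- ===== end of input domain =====

-- B re-decomposes A's single mutating loop into classify-lines / segment-into-blocks / build-dict-per-block passes; objective: simpler decomposition, same cost.

-- ===== PORT A =====
-- One fold over the lines, carrying (finished strategies as item lists, current dict), exactly A's loop.
def pvStepA (s : List (List (String × String)) × PySem.Dict String String) (rawline : String) :
    List (List (String × String)) × PySem.Dict String String :=
  let line := PySem.Str.strip rawline
  let low := PySem.Str.lower line
  if PySem.Str.isIn "type:" low || PySem.Str.isIn "strategy:" low then
    ((if s.2.items ≠ [] then s.1 ++ [s.2.items] else s.1),
     PySem.Dict.ofList [("type", PySem.Str.strip ((((PySem.Str.split? line ":").getD []).getD 1 "")))])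
  else if PySem.Str.isIn "description:" low then
    (s.1, s.2.insert "description" (PySem.Str.strip ((((PySem.Str.splitMax? line ":" 1).getD []).getD 1 ""))))
  else if PySem.Str.isIn "priority:" low then
    (s.1, s.2.insert "priority" (PySem.Str.lower (PySem.Str.strip ((((PySem.Str.split? line ":").getD []).getD 1 "")))))
  else if PySem.Str.isIn "timeline:" low then
    (s.1, s.2.insert "timeline" (PySem.Str.strip ((((PySem.Str.splitMax? line ":" 1).getD []).getD 1 ""))))
  else s

def parse_strategies_from_text_py (text : String) : List (List (String × String)) :=
  let lines := (PySem.Str.split? text "\n").getD []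
  let r := lines.foldl pvStepA ([], PySem.Dict.empty)
  let strategies := if r.2.items ≠ [] then r.1 ++ [r.2.items] else r.1
  strategies.take 6

-- ===== PORT B =====
-- classify: Source B's field recogniser, some (key, value) for a recognised line, none otherwise.
def pvClassify (line : String) : Option (String × String) :=
  let low := PySem.Str.lower line
  if PySem.Str.isIn "type:" low || PySem.Str.isIn "strategy:" low then
    some ("type", PySem.Str.strip ((((PySem.Str.split? line ":").getD []).getD 1 "")))
  else if PySem.Str.isIn "description:" low then
    some ("description", PySem.Str.strip ((((PySem.Str.splitMax? line ":" 1).getD []).getD 1 "")))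
  else if PySem.Str.isIn "priority:" low then
    some ("priority", PySem.Str.lower (PySem.Str.strip ((((PySem.Str.split? line ":").getD []).getD 1 ""))))
  else if PySem.Str.isIn "timeline:" low then
    some ("timeline", PySem.Str.strip ((((PySem.Str.splitMax? line ":" 1).getD []).getD 1 "")))
  else none

-- Source B's blocks list with a mutable last block, as (done blocks, last block).
def pvSegStep (bs : List (List (String × String)) × List (String × String)) (kv : String × String) :
    List (List (String × String)) × List (String × String) :=
  if kv.1 == "type" then (bs.1 ++ [bs.2], [kv]) else (bs.1, bs.2 ++ [kv])

def parse_strategies_from_text_py_alt (text : String) : List (List (String × String)) :=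
  let lines := (PySem.Str.split? text "\n").getD []
  let fields := lines.filterMap (fun l => pvClassify (PySem.Str.strip l))
  let r := fields.foldl pvSegStep ([], [])
  let blocks := r.1 ++ [r.2]
  (((blocks.filter (· ≠ [])).map (fun b => (PySem.Dict.ofList b).items))).take 6

-- ===== PRECONDITION & SPEC =====
def Spec_parse_strategies_from_text_py (text : String) (out : List (List (String × String))) : Prop := out = parse_strategies_from_text_py_alt text
instance (text : String) (out : List (List (String × String))) : Decidable (Spec_parse_strategies_from_text_py text out) := by unfold Spec_parse_strategies_from_text_py; infer_instance

-- ===== CLAIM (what is proved, stated in full; the proofs are below) =====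
def Claim_equal_parse_strategies_from_text_py : Prop := ∀ (text : String), Dom_parse_strategies_from_text_py text → Spec_parse_strategies_from_text_py text (parse_strategies_from_text_py text)

-- ===== LEMMAS AND PROOFS =====

-- A's step on the already-classified field (the four branches of pvStepA, keyed by pvClassify's tag).
def pvStepA' (s : List (List (String × String)) × PySem.Dict String String) (kv : String × String) :
    List (List (String × String)) × PySem.Dict String String :=
  if kv.1 == "type" then
    ((if s.2.items ≠ [] then s.1 ++ [s.2.items] else s.1), PySem.Dict.ofList [kv])
  else (s.1, s.2.insert kv.1 kv.2)

lemma pvStepA_classify (s : List (List (String × String)) × PySem.Dict String String) (rawline : String) :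
    pvStepA s rawline = match pvClassify (PySem.Str.strip rawline) with
      | none => s
      | some kv => pvStepA' s kv := by
  unfold pvStepA pvClassify
  by_cases h1 : (PySem.Str.isIn "type:" (PySem.Str.lower (PySem.Str.strip rawline)) || PySem.Str.isIn "strategy:" (PySem.Str.lower (PySem.Str.strip rawline))) = true
  · simp only [h1, if_pos]; simp [pvStepA']
  · by_cases h2 : PySem.Str.isIn "description:" (PySem.Str.lower (PySem.Str.strip rawline)) = true
    · simp only [h1, h2, if_false, Bool.false_eq_true, if_pos]; simp [pvStepA']
    · by_cases h3 : PySem.Str.isIn "priority:" (PySem.Str.lower (PySem.Str.strip rawline)) = true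
      · simp only [h1, h2, h3]; simp [pvStepA']
      · by_cases h4 : PySem.Str.isIn "timeline:" (PySem.Str.lower (PySem.Str.strip rawline)) = true
        · simp only [h1, h2, h3, h4]; simp [pvStepA']
        · simp only [h1, h2, h3, h4]; simp

lemma pvFoldA_filterMap (lines : List String) (s : List (List (String × String)) × PySem.Dict String String) :
    lines.foldl pvStepA s = (lines.filterMap (fun l => pvClassify (PySem.Str.strip l))).foldl pvStepA' s := by
  induction lines generalizing s with
  | nil => rfl
  | cons l t ih =>
    simp only [List.foldl_cons, List.filterMap_cons]
    rw [pvStepA_classify]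
    cases pvClassify (PySem.Str.strip l) with
    | none => exact ih s
    | some kv => simp [ih]

lemma pvItems_ofList_ne_nil (b : List (String × String)) (hb : b ≠ []) :
    (PySem.Dict.ofList b).items ≠ [] := by
  have key : ∀ (l : List (String × String)) (d : PySem.Dict String String), d.items ≠ [] →
      (l.foldl (fun d kv => d.insert kv.1 kv.2) d).items ≠ [] := by
    intro l
    induction l with
    | nil => intro d hd; exact hd
    | cons kv t ih =>
      intro d hd
      simp only [List.foldl_cons]
      apply ih
      by_cases hc : d.contains kv.1
      · rw [PySem.Dict.items_insert_of_contains _ _ hc]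
        simpa using hd
      · rw [PySem.Dict.items_insert_of_not_contains _ _ (by simpa using hc)]
        simp
  cases b with
  | nil => exact absurd rfl hb
  | cons kv t =>
    show ((kv :: t).foldl (fun d kv => d.insert kv.1 kv.2) PySem.Dict.empty).items ≠ []
    simp only [List.foldl_cons]
    apply key
    by_cases hc : (PySem.Dict.empty : PySem.Dict String String).contains kv.1
    · simp at hc
    · rw [PySem.Dict.items_insert_of_not_contains _ _ (by simp)]; simp

lemma pvOfList_append_singleton (b : List (String × String)) (kv : String × String) :
    PySem.Dict.ofList (b ++ [kv]) = (PySem.Dict.ofList b).insert kv.1 kv.2 := by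
  simp [PySem.Dict.ofList, PySem.Dict.update, List.foldl_append]

-- the final assembled lists agree, given the state invariant between A's (st, cur) and B's (prev, last)
lemma pvMain (fs : List (String × String)) (st prev : List (List (String × String)))
    (cur : PySem.Dict String String) (last : List (String × String))
    (h1 : st = (prev.filter (· ≠ [])).map (fun b => (PySem.Dict.ofList b).items))
    (h2 : cur = PySem.Dict.ofList last) :
    (let r := fs.foldl pvStepA' (st, cur)
     if r.2.items ≠ [] then r.1 ++ [r.2.items] else r.1) =
    (let r := fs.foldl pvSegStep (prev, last)
     ((r.1 ++ [r.2]).filter (· ≠ [])).map (fun b => (PySem.Dict.ofList b).items)) := by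
  induction fs generalizing st prev cur last with
  | nil =>
    simp only [List.foldl_nil, List.filter_append, List.map_append, h1, h2]
    by_cases hl : last = []
    · subst hl
      have : (PySem.Dict.ofList ([] : List (String × String))).items = [] := rfl
      simp [this]
    · have := pvItems_ofList_ne_nil last hl
      simp [hl, this]
  | cons kv t ih =>
    simp only [List.foldl_cons]
    by_cases hk : kv.1 == "type"
    · simp only [pvStepA', pvSegStep, hk, if_pos]
      apply ih
      · simp only [h1, h2, List.filter_append, List.map_append]
        by_cases hl : last = []
        · subst hl
          have : (PySem.Dict.ofList ([] : List (String × String))).items = [] := rfl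
          simp [this]
        · have := pvItems_ofList_ne_nil last hl
          simp [hl, this]
      · rfl
    · simp only [pvStepA', pvSegStep, hk, if_neg, Bool.false_eq_true, not_false_iff]
      apply ih
      · exact h1
      · rw [h2, pvOfList_append_singleton]

-- ===== VERDICT (by name: the statement is the Claim_ definition above) =====
theorem parse_strategies_from_text_py_spec : Claim_equal_parse_strategies_from_text_py := by
  intro text _
  show parse_strategies_from_text_py text = parse_strategies_from_text_py_alt text
  unfold parse_strategies_from_text_py parse_strategies_from_text_py_alt
  simp only
  rw [pvFoldA_filterMap]
  have h := pvMain ((((PySem.Str.split? text "\n").getD []).filterMap (fun l => pvClassify (PySem.Str.strip l))))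
      [] [] PySem.Dict.empty [] (by simp) rfl
  simp only at h
  rw [h]
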